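-- pv_equiv track=rewrite | github.com/Daddycation23/UBS_Coding_Challenge | main.py | _analyze_character_patterns
-- ===== SOURCE A (Python) =====
-- def _analyze_character_patterns(strings):
--     """Analyzes strings to find common character patterns."""
--     patterns = []
--     # Check all possible character classes
--     if all(s.isalpha() for s in strings):
--         patterns.append(r'\D')
--     if all(s.isdigit() for s in strings):
--         patterns.append(r'\d')
--     if all(c.isalnum() or c == '_' for s in strings for c in s):
--         patterns.append(r'\w')
--     # For single characters, always include exact match
--     if all(len(s) == 1 for s in strings):
--         if len(set(strings)) == 1:  # All strings are the same single character
--             patterns.append(strings[0])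
--     return patterns
-- ===== SOURCE B (Python) =====
-- def _analyze_character_patterns(strings):
--     """Single-pass: accumulate all class flags and the distinct-string set in one sweep."""
--     alpha_all = digit_all = word_all = len1_all = True
--     distinct = set()
--     for s in strings:
--         alpha_all = alpha_all and s.isalpha()
--         digit_all = digit_all and s.isdigit()
--         len1_all = len1_all and len(s) == 1
--         for c in s:
--             word_all = word_all and (c.isalnum() or c == '_')
--         distinct.add(s)
--     patterns = []
--     if alpha_all:
--         patterns.append(r'\D')
--     if digit_all:
--         patterns.append(r'\d')
--     if word_all:
--         patterns.append(r'\w')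
--     if len1_all and len(distinct) == 1:
--         patterns.append(next(iter(distinct)))
--     return patterns
-- ===== Notes on version B (the rewrite author's own statement) =====
-- stated objective: alternative
-- what changed: Replaces A's four independent full passes over the list (three all(...) scans and a set(strings) construction) with one fold that accumulates the alpha/digit/word/len-1 flags and the distinct-string set together, then emits the patterns from the final state.
import Mathlib
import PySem

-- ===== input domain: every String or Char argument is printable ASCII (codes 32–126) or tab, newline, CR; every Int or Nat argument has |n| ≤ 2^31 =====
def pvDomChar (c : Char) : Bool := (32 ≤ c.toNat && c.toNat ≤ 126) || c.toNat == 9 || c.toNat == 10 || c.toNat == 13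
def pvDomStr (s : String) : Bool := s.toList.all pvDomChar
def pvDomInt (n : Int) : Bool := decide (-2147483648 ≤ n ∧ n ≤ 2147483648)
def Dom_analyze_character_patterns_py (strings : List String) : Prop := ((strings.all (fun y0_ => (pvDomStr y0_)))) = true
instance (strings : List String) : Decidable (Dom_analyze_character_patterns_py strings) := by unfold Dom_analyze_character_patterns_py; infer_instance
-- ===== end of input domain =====

-- B replaces A's four separate full passes over the list by one sweep that accumulates
-- all four flags and the distinct-string set together (objective: alternative decomposition).

-- ===== PORT A =====
-- four independent 'all(...)' scans, then the single-character check
def analyze_character_patterns_py (strings : List String) : List String :=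
  let patterns : List String := []
  let patterns := if strings.all (fun s => PySem.Str.strIsalpha s) then patterns ++ ["\\D"] else patterns
  let patterns := if strings.all (fun s => PySem.Str.strIsdigit s) then patterns ++ ["\\d"] else patterns
  let patterns := if strings.all (fun s => s.toList.all (fun c => PySem.Str.isalnum c || c == '_')) then patterns ++ ["\\w"] else patterns
  if strings.all (fun s => PySem.Str.len s == 1) then
    if PySem.Set.len (PySem.Set.ofList strings) == 1 then
      -- strings[0]: the set-size-1 branch guarantees the list is nonempty, so getD never fires
      patterns ++ [(PySem.List.pyGet? strings 0).getD ""]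
    else patterns
  else patterns

-- ===== PORT B =====
-- one fold over the strings carrying (alpha_all, digit_all, word_all, len1_all, distinct set)
def analyze_character_patterns_py_alt (strings : List String) : List String :=
  let st := strings.foldl
    (fun (st : Bool × Bool × Bool × Bool × PySem.Set String) s =>
      let word := s.toList.foldl (fun w c => w && (PySem.Str.isalnum c || c == '_')) st.2.2.1
      (st.1 && PySem.Str.strIsalpha s,
       st.2.1 && PySem.Str.strIsdigit s,
       word,
       st.2.2.2.1 && (PySem.Str.len s == 1),
       PySem.Set.add st.2.2.2.2 s))
    (true, true, true, true, PySem.Set.empty)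
  let patterns : List String := []
  let patterns := if st.1 then patterns ++ ["\\D"] else patterns
  let patterns := if st.2.1 then patterns ++ ["\\d"] else patterns
  let patterns := if st.2.2.1 then patterns ++ ["\\w"] else patterns
  if st.2.2.2.1 && (PySem.Set.len st.2.2.2.2 == 1) then
    -- next(iter(distinct)): the unique element of the singleton set, its first (= only) entry
    patterns ++ [st.2.2.2.2.headD ""]
  else patterns

-- ===== PRECONDITION & SPEC =====
def Spec_analyze_character_patterns_py (strings : List String) (out : List String) : Prop := out = analyze_character_patterns_py_alt strings
instance (strings : List String) (out : List String) : Decidable (Spec_analyze_character_patterns_py strings out) := by unfold Spec_analyze_character_patterns_py; infer_instance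

-- ===== CLAIM (what is proved, stated in full; the proofs are below) =====
def Claim_equal_analyze_character_patterns_py : Prop := ∀ (strings : List String), Dom_analyze_character_patterns_py strings → Spec_analyze_character_patterns_py strings (analyze_character_patterns_py strings)

-- ===== LEMMAS AND PROOFS =====

theorem foldl_and_eq_all {α : Type} (f : α → Bool) (xs : List α) (w : Bool) :
    xs.foldl (fun b x => b && f x) w = (w && xs.all f) := by
  induction xs generalizing w with
  | nil => simp
  | cons x t ih => simp [List.foldl_cons, ih, Bool.and_assoc]

theorem fold_state_eq (strings : List String)
    (a b w l : Bool) (d : PySem.Set String) :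
    strings.foldl
      (fun (st : Bool × Bool × Bool × Bool × PySem.Set String) s =>
        let word := s.toList.foldl (fun w c => w && (PySem.Str.isalnum c || c == '_')) st.2.2.1
        (st.1 && PySem.Str.strIsalpha s,
         st.2.1 && PySem.Str.strIsdigit s,
         word,
         st.2.2.2.1 && (PySem.Str.len s == 1),
         PySem.Set.add st.2.2.2.2 s)) (a, b, w, l, d) =
      (a && strings.all (fun s => PySem.Str.strIsalpha s),
       b && strings.all (fun s => PySem.Str.strIsdigit s),
       w && strings.all (fun s => s.toList.all (fun c => PySem.Str.isalnum c || c == '_')),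
       l && strings.all (fun s => PySem.Str.len s == 1),
       strings.foldl PySem.Set.add d) := by
  induction strings generalizing a b w l d with
  | nil => simp
  | cons s t ih =>
    rw [List.foldl_cons]
    show t.foldl _ (a && PySem.Str.strIsalpha s, b && PySem.Str.strIsdigit s,
        s.toList.foldl (fun w c => w && (PySem.Str.isalnum c || c == '_')) w,
        l && (PySem.Str.len s == 1), PySem.Set.add d s) = _
    rw [ih, foldl_and_eq_all]
    simp [List.all_cons, Bool.and_assoc]

theorem foldl_add_head? (xs : List String) (acc : List String) (x : String) :
    (xs.foldl PySem.Set.add (x :: acc)).head? = some x := by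
  induction xs generalizing acc with
  | nil => rfl
  | cons y t ih =>
    rw [List.foldl_cons]
    unfold PySem.Set.add
    split
    · exact ih acc
    · show (t.foldl PySem.Set.add ((x :: acc) ++ [y])).head? = some x
      rw [List.cons_append]
      exact ih (acc ++ [y])

theorem head?_ofList_cons (s : String) (t : List String) :
    (PySem.Set.ofList (s :: t)).head? = some s := by
  have h1 : PySem.Set.ofList (s :: t) = t.foldl PySem.Set.add [s] := rfl
  rw [h1]
  exact foldl_add_head? t [] s

-- ===== VERDICT (by name: the statement is the Claim_ definition above) =====
theorem analyze_character_patterns_py_spec : Claim_equal_analyze_character_patterns_py := by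
  intro strings _
  show analyze_character_patterns_py strings = analyze_character_patterns_py_alt strings
  unfold analyze_character_patterns_py analyze_character_patterns_py_alt
  rw [fold_state_eq]
  have hfold : strings.foldl PySem.Set.add ([] : PySem.Set String) = PySem.Set.ofList strings :=
    (PySem.Set.ofList_eq_foldl strings).symm
  simp only [Bool.true_and, PySem.Set.empty, hfold]
  cases hA : strings.all (fun s => PySem.Str.len s == 1) with
  | false => simp  -- flag false: last branch absent on both sides
  | true =>
    cases hC : ((PySem.Set.ofList strings).len == 1) with
    | false => simp
    | true =>
      cases strings with
      | nil => simp [PySem.Set.ofList, PySem.Set.len] at hC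
      | cons s t =>
        simp [head?_ofList_cons, PySem.List.pyGet?, PySem.List.pyIdx?]
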